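-- pv_equiv track=rewrite | github.com/TommyVaninetti/PlantLeaf-Desktop-App | src/windows/replay_window_audio.py | _group_consecutive_peaks
-- ===== SOURCE A (Python) =====
-- def _group_consecutive_peaks(indices, max_gap_frames=5):
--     """
--     Raggruppa picchi consecutivi in eventi singoli.
--     max_gap_frames: gap massimo tra picchi per considerarli stesso evento
--     """
--     if len(indices) == 0:
--         return []
--
--     groups = []
--     current_group = [indices[0]]
--
--     for i in range(1, len(indices)):
--         if indices[i] - indices[i-1] <= max_gap_frames:
--             current_group.append(indices[i])
--         else:
--             groups.append(current_group)
--             current_group = [indices[i]]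
--
--     groups.append(current_group)  # Aggiungi ultimo gruppo
--
--     return groups
-- ===== SOURCE B (Python) =====
-- def _group_consecutive_peaks(indices, max_gap_frames=5):
--     """
--     Raggruppa picchi consecutivi in eventi singoli.
--     max_gap_frames: gap massimo tra picchi per considerarli stesso evento
--     """
--     if len(indices) == 0:
--         return []
--     splits = [i for i in range(1, len(indices))
--               if indices[i] - indices[i-1] > max_gap_frames]
--     bounds = [0] + splits + [len(indices)]
--     return [indices[b:e] for b, e in zip(bounds, bounds[1:])]
-- ===== Notes on version B (the rewrite author's own statement) =====
-- stated objective: alternative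
-- what changed: B replaces A's stateful loop that grows a current_group accumulator by a filter pass that collects the split positions, builds a bounds list from zero, the splits and the length, and materializes each group by slicing indices between consecutive bounds.
import Mathlib
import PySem

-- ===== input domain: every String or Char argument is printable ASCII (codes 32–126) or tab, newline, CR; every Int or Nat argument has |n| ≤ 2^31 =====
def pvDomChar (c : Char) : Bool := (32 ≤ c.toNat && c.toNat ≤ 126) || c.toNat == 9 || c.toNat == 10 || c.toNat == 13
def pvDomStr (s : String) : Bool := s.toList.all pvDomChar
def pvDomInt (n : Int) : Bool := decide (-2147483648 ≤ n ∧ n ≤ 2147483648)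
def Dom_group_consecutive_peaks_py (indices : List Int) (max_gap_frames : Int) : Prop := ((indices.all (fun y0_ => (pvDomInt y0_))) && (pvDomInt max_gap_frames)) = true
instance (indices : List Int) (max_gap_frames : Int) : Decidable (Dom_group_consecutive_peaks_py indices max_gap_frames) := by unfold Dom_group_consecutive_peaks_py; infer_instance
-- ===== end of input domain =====

-- B replaces A's stateful current_group accumulation by a filter pass collecting split
-- positions followed by slicing between consecutive bounds (objective: alternative).


-- ===== PORT A =====
def group_consecutive_peaks_py (indices : List Int) (max_gap_frames : Int) : List (List Int) :=
  if indices.length = 0 then []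
  else
    let st := (PySem.List.pyRange 1 indices.length 1).foldl
      (fun (st : List (List Int) × List Int) i =>
        if PySem.List.pyGetD indices i 0 - PySem.List.pyGetD indices (i - 1) 0 ≤ max_gap_frames then
          (st.1, st.2 ++ [PySem.List.pyGetD indices i 0])
        else
          (st.1 ++ [st.2], [PySem.List.pyGetD indices i 0]))
      ([], [PySem.List.pyGetD indices 0 0])
    st.1 ++ [st.2]

-- ===== PORT B =====
def group_consecutive_peaks_py_alt (indices : List Int) (max_gap_frames : Int) : List (List Int) :=
  if indices.length = 0 then []
  else
    let n : Int := indices.length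
    let splits : List Int := (PySem.List.pyRange 1 n 1).filter
      (fun i => max_gap_frames < PySem.List.pyGetD indices i 0 - PySem.List.pyGetD indices (i - 1) 0)
    let bounds : List Int := 0 :: (splits ++ [n])
    (bounds.zip bounds.tail).map (fun be => PySem.List.slice indices (some be.1) (some be.2))

-- ===== PRECONDITION & SPEC =====
def Spec_group_consecutive_peaks_py (indices : List Int) (max_gap_frames : Int) (out : List (List Int)) : Prop := out = group_consecutive_peaks_py_alt indices max_gap_frames
instance (indices : List Int) (max_gap_frames : Int) (out : List (List Int)) : Decidable (Spec_group_consecutive_peaks_py indices max_gap_frames out) := by unfold Spec_group_consecutive_peaks_py; infer_instance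

-- ===== CLAIM (what is proved, stated in full; the proofs are below) =====
def Claim_equal_group_consecutive_peaks_py : Prop := ∀ (indices : List Int) (max_gap_frames : Int), Dom_group_consecutive_peaks_py indices max_gap_frames → Spec_group_consecutive_peaks_py indices max_gap_frames (group_consecutive_peaks_py indices max_gap_frames)

-- ===== LEMMAS AND PROOFS =====

-- Reference recursion both ports are reduced to: process the tail, growing the current
-- group `cur` while the gap to `prev` stays within `g`.
def pvGrp (g : Int) (cur : List Int) (prev : Int) : List Int → List (List Int)
  | [] => [cur]
  | y :: ys => if y - prev ≤ g then pvGrp g (cur ++ [y]) y ys else cur :: pvGrp g [y] y ys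

-- B's zip-of-bounds map, written as a recursion over the split list.
def pvSliceGroups (xs : List Int) (b : Int) : List Int → List (List Int)
  | [] => [PySem.List.slice xs (some b) (some xs.length)]
  | s :: ss => PySem.List.slice xs (some b) (some s) :: pvSliceGroups xs s ss

theorem pvMapZip (xs : List Int) (b : Int) (l : List Int) :
    (((b :: (l ++ [(xs.length : Int)])).zip (l ++ [(xs.length : Int)])).map
      (fun be => PySem.List.slice xs (some be.1) (some be.2)))
      = pvSliceGroups xs b l := by
  induction l generalizing b with
  | nil => simp [pvSliceGroups]
  | cons s ss ih => simpa [pvSliceGroups] using ih s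

theorem pvDropCons (xs : List Int) (y : Int) (ys : List Int) (k : Nat)
    (hk1 : k + 1 < xs.length) (hdrop : xs.drop (k + 1) = y :: ys) :
    xs.getD (k + 1) 0 = y ∧ xs.drop (k + 2) = ys := by
  have hgc := List.drop_eq_getElem_cons hk1
  rw [hdrop] at hgc
  injection hgc with h1 h2
  constructor
  · simp [List.getD, List.getElem?_eq_getElem hk1, h1]
  · have hnat : k + 1 + 1 = k + 2 := by omega
    rw [hnat] at h2
    exact h2.symm

theorem pvFoldA (xs : List Int) (g : Int) :
    ∀ (ys : List Int) (k : Nat), k < xs.length → xs.drop (k + 1) = ys →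
    ∀ (gs : List (List Int)) (cur : List Int),
    ((PySem.List.pyRange ((k + 1 : Nat) : Int) xs.length 1).foldl
      (fun (st : List (List Int) × List Int) i =>
        if PySem.List.pyGetD xs i 0 - PySem.List.pyGetD xs (i - 1) 0 ≤ g then
          (st.1, st.2 ++ [PySem.List.pyGetD xs i 0])
        else
          (st.1 ++ [st.2], [PySem.List.pyGetD xs i 0]))
      (gs, cur)).1 ++
    [((PySem.List.pyRange ((k + 1 : Nat) : Int) xs.length 1).foldl
      (fun (st : List (List Int) × List Int) i =>
        if PySem.List.pyGetD xs i 0 - PySem.List.pyGetD xs (i - 1) 0 ≤ g then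
          (st.1, st.2 ++ [PySem.List.pyGetD xs i 0])
        else
          (st.1 ++ [st.2], [PySem.List.pyGetD xs i 0]))
      (gs, cur)).2] = gs ++ pvGrp g cur (xs.getD k 0) ys := by
  intro ys
  induction ys with
  | nil =>
    intro k hk hdrop gs cur
    have hlen : xs.length ≤ k + 1 := by
      by_contra h
      have := List.drop_eq_nil_iff.mp hdrop
      omega
    rw [PySem.List.pyRange_one_eq_nil (by exact_mod_cast hlen)]
    simp [pvGrp]
  | cons y ys ih =>
    intro k hk hdrop gs cur
    have hk1 : k + 1 < xs.length := by
      by_contra h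
      have : xs.drop (k + 1) = [] := List.drop_eq_nil_iff.mpr (by omega)
      simp [this] at hdrop
    obtain ⟨hy, hdrop2⟩ := pvDropCons xs y ys k hk1 hdrop
    have hc2 : ((k + 1 : Nat) : Int) + 1 = ((k + 2 : Nat) : Int) := by push_cast; ring
    rw [PySem.List.pyRange_one_cons
      (show ((k + 1 : Nat) : Int) < (xs.length : Int) by exact_mod_cast hk1), hc2]
    simp only [List.foldl_cons]
    have e1 : PySem.List.pyGetD xs ((k + 1 : Nat) : Int) 0 = y := by
      rw [PySem.List.pyGetD_natCast, hy]
    have e0 : PySem.List.pyGetD xs (((k + 1 : Nat) : Int) - 1) 0 = xs.getD k 0 := by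
      have : (((k + 1 : Nat) : Int) - 1) = ((k : Nat) : Int) := by push_cast; ring
      rw [this, PySem.List.pyGetD_natCast]
    rw [e1, e0]
    by_cases hle : y - xs.getD k 0 ≤ g
    · rw [if_pos hle]
      rw [ih (k + 1) hk1 hdrop2 gs (cur ++ [y]), hy]
      simp only [pvGrp]
      rw [if_pos hle]
    · rw [if_neg hle]
      rw [ih (k + 1) hk1 hdrop2 (gs ++ [cur]) [y], hy]
      simp only [pvGrp]
      rw [if_neg hle, List.append_assoc]
      rfl

theorem pvSliceOne (xs : List Int) (k : Nat) (hk : k < xs.length) :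
    PySem.List.slice xs (some ((k : Nat) : Int)) (some ((k + 1 : Nat) : Int)) = [xs.getD k 0] := by
  rw [PySem.List.slice_natCast]
  have : k + 1 - k = 1 := by omega
  rw [this]
  rw [List.take_one, List.head?_drop]
  simp [List.getD, List.getElem?_eq_getElem hk]

theorem pvSliceExtend (xs : List Int) (b k : Nat) (hb : b ≤ k) (hk1 : k + 1 < xs.length) :
    PySem.List.slice xs (some ((b : Nat) : Int)) (some ((k + 1 : Nat) : Int)) ++ [xs.getD (k + 1) 0]
      = PySem.List.slice xs (some ((b : Nat) : Int)) (some ((k + 2 : Nat) : Int)) := by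
  rw [PySem.List.slice_natCast, PySem.List.slice_natCast]
  have e2 : k + 2 - b = (k + 1 - b) + 1 := by omega
  rw [e2, List.take_add_one]
  have hget : (xs.drop b)[k + 1 - b]? = some (xs.getD (k + 1) 0) := by
    rw [List.getElem?_drop]
    have hbk2 : b + (k + 1 - b) = k + 1 := by omega
    rw [hbk2, List.getElem?_eq_getElem hk1]
    simp [List.getD, List.getElem?_eq_getElem hk1]
  rw [hget]
  rfl

theorem pvFoldB (xs : List Int) (g : Int) :
    ∀ (ys : List Int) (k : Nat), k < xs.length → xs.drop (k + 1) = ys →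
    ∀ (b : Nat), b ≤ k →
    pvSliceGroups xs ((b : Nat) : Int)
      ((PySem.List.pyRange ((k + 1 : Nat) : Int) xs.length 1).filter
        (fun i => g < PySem.List.pyGetD xs i 0 - PySem.List.pyGetD xs (i - 1) 0))
      = pvGrp g (PySem.List.slice xs (some ((b : Nat) : Int)) (some ((k + 1 : Nat) : Int)))
          (xs.getD k 0) ys := by
  intro ys
  induction ys with
  | nil =>
    intro k hk hdrop b hb
    have hlen : xs.length = k + 1 := by
      have := List.drop_eq_nil_iff.mp hdrop
      omega
    rw [PySem.List.pyRange_one_eq_nil (by exact_mod_cast hlen.le)]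
    simp only [List.filter_nil, pvSliceGroups, pvGrp]
    rw [hlen]
  | cons y ys ih =>
    intro k hk hdrop b hb
    have hk1 : k + 1 < xs.length := by
      by_contra h
      have : xs.drop (k + 1) = [] := List.drop_eq_nil_iff.mpr (by omega)
      simp [this] at hdrop
    obtain ⟨hy, hdrop2⟩ := pvDropCons xs y ys k hk1 hdrop
    have hc2 : ((k + 1 : Nat) : Int) + 1 = ((k + 2 : Nat) : Int) := by push_cast; ring
    rw [PySem.List.pyRange_one_cons
      (show ((k + 1 : Nat) : Int) < (xs.length : Int) by exact_mod_cast hk1), hc2]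
    have e1 : PySem.List.pyGetD xs ((k + 1 : Nat) : Int) 0 = y := by
      rw [PySem.List.pyGetD_natCast, hy]
    have e0 : PySem.List.pyGetD xs (((k + 1 : Nat) : Int) - 1) 0 = xs.getD k 0 := by
      have : (((k + 1 : Nat) : Int) - 1) = ((k : Nat) : Int) := by push_cast; ring
      rw [this, PySem.List.pyGetD_natCast]
    simp only [List.filter_cons, e1, e0]
    have hnat : k + 1 + 1 = k + 2 := by omega
    have ihk := ih (k + 1)
    rw [hnat] at ihk
    by_cases hgt : g < y - xs.getD k 0
    · rw [if_pos (by simp only [decide_eq_true_eq]; exact hgt)]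
      simp only [pvSliceGroups]
      have ih' := ihk hk1 hdrop2 (k + 1) le_rfl
      rw [ih', hy]
      rw [pvSliceOne xs (k + 1) hk1, hy]
      simp only [pvGrp]
      rw [if_neg (not_le.mpr hgt)]
    · rw [if_neg (by simp only [decide_eq_true_eq]; exact hgt)]
      have hle : y - xs.getD k 0 ≤ g := not_lt.mp hgt
      have ih' := ihk hk1 hdrop2 b (by omega)
      have hext := pvSliceExtend xs b k hb hk1
      rw [hy] at hext
      rw [ih', hy, ← hext]
      simp only [pvGrp]
      rw [if_pos hle]

-- ===== VERDICT (by name: the statement is the Claim_ definition above) =====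
theorem group_consecutive_peaks_py_spec : Claim_equal_group_consecutive_peaks_py := by
  intro indices g _
  unfold Spec_group_consecutive_peaks_py
  by_cases h0 : indices.length = 0
  · simp [group_consecutive_peaks_py, group_consecutive_peaks_py_alt, h0]
  · have hpos : 0 < indices.length := Nat.pos_of_ne_zero h0
    have hdrop : indices.drop (0 + 1) = indices.tail := by
      simp
    have hA := pvFoldA indices g indices.tail 0 hpos hdrop [] [indices.getD 0 0]
    have hB := pvFoldB indices g indices.tail 0 hpos hdrop 0 le_rfl
    rw [pvSliceOne indices 0 hpos] at hB
    simp only [zero_add, Nat.cast_one, Nat.cast_zero] at hA hB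
    simp only [group_consecutive_peaks_py, group_consecutive_peaks_py_alt, if_neg h0]
    have e00 : PySem.List.pyGetD indices 0 0 = indices.getD 0 0 := by
      simpa using PySem.List.pyGetD_natCast indices 0 0
    rw [e00, hA, List.nil_append, List.tail_cons, pvMapZip indices 0, hB]
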